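-- pv_equiv track=rewrite | github.com/sexymetra/sexymetra | shlee_12191865_hw9.py | choose_two
-- ===== SOURCE A (Python) =====
-- def choose_two(n):
--     L = []
--     for i in range(n):
--         for j in range(n):
--             a = (i,j)
--             if len(set(a)) ==2:
--                 L.append(set(a))
--     M = []
--     for k in L:
--         if not (k in M):
--             M.append(k)
--     return M
-- ===== SOURCE B (Python) =====
-- def choose_two(n):
--     return [{i, j} for i in range(n) for j in range(i + 1, n)]
-- ===== Notes on version B (the rewrite author's own statement) =====
-- stated objective: faster
-- what changed: B emits each unordered pair {i,j} with i<j directly from a triangular double loop, removing A's full n*n pair generation and its quadratic-scan deduplication pass.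
import Mathlib
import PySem

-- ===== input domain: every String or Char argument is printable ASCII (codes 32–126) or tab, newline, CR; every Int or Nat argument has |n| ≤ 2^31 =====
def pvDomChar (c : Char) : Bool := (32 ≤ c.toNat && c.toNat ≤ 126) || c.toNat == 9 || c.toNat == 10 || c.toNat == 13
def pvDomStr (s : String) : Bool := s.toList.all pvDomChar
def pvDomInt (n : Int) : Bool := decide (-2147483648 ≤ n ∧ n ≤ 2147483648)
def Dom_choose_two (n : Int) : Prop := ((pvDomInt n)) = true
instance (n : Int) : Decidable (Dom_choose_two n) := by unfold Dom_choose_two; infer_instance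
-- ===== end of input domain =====

-- B replaces A's full n×n pair generation plus quadratic dedup scan by directly emitting {i,j} for j>i: asymptotically faster (O(n^2) vs O(n^4)).


-- ===== PORT A =====
-- literal port of A: build L over the full n×n grid keeping sets of size 2, then dedup by a scan
def choose_two (n : Int) : List (List Int) :=
  let L : List (PySem.Set Int) :=
    (PySem.List.pyRange 0 n 1).foldl (fun L i =>
      (PySem.List.pyRange 0 n 1).foldl (fun L j =>
        let a := (i, j)
        if PySem.Set.len (PySem.Set.ofList [a.1, a.2]) = 2 then
          L ++ [PySem.Set.ofList [a.1, a.2]]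
        else L) L) []
  L.foldl (fun M k =>
    if M.any (fun m => PySem.Set.equal k m) then M else M ++ [k]) []

-- ===== PORT B =====
-- literal port of B: [{i, j} for i in range(n) for j in range(i+1, n)]
def choose_two_alt (n : Int) : List (List Int) :=
  (PySem.List.pyRange 0 n 1).flatMap (fun i =>
    (PySem.List.pyRange (i + 1) n 1).map (fun j => PySem.Set.ofList [i, j]))

-- ===== PRECONDITION & SPEC =====
def Spec_choose_two (n : Int) (out : List (List Int)) : Prop := out = choose_two_alt n
instance (n : Int) (out : List (List Int)) : Decidable (Spec_choose_two n out) := by unfold Spec_choose_two; infer_instance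

-- ===== CLAIM (what is proved, stated in full; the proofs are below) =====
def Claim_equal_choose_two : Prop := ∀ (n : Int), Dom_choose_two n → Spec_choose_two n (choose_two n)

-- ===== LEMMAS AND PROOFS =====

-- the target shape: the strictly-upper-triangular pairs [i,j], rows i ∈ [0,m), columns j ∈ (i,n)
def pvPairs (m n : Int) : List (List Int) :=
  (PySem.List.pyRange 0 m 1).flatMap (fun i =>
    (PySem.List.pyRange (i + 1) n 1).map (fun j => [i, j]))

-- A's dedup loop as a function of the accumulator
def pvDfold (acc : List (List Int)) (l : List (List Int)) : List (List Int) :=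
  l.foldl (fun M k =>
    if M.any (fun m => PySem.Set.equal k m) then M else M ++ [k]) acc

theorem pvOfList_pair (i j : Int) (h : i ≠ j) : PySem.Set.ofList [i, j] = [i, j] := by
  simp only [PySem.Set.ofList, PySem.Set.add, PySem.Set.contains, PySem.Set.empty,
    List.foldl_cons, List.foldl_nil, List.contains_nil]
  have : ¬ j = i := fun hh => h hh.symm
  simp [this]

theorem pvOfList_pair_self (i : Int) : PySem.Set.ofList [i, i] = [i] := by
  simp only [PySem.Set.ofList, PySem.Set.add, PySem.Set.contains, PySem.Set.empty,
    List.foldl_cons, List.foldl_nil, List.contains_nil]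
  simp

theorem pvEqual_pair_iff (i j i' j' : Int) :
    PySem.Set.equal [i, j] [i', j'] = true ↔ ((i = i' ∨ i = j') ∧ (j = i' ∨ j = j') ∧ (i' = i ∨ i' = j) ∧ (j' = i ∨ j' = j)) := by
  simp only [PySem.Set.equal, PySem.Set.issubset, PySem.Set.contains, List.all_cons, List.all_nil,
    List.contains_cons, List.contains_nil, Bool.or_false, Bool.and_true, Bool.and_eq_true,
    Bool.or_eq_true, beq_iff_eq]
  tauto

-- A's inner loop over one row i, in terms of filter/map
theorem pvInner_fold (i : Int) (l : List Int) (acc : List (PySem.Set Int)) :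
    l.foldl (fun L j =>
        if PySem.Set.len (PySem.Set.ofList [i, j]) = 2 then
          L ++ [PySem.Set.ofList [i, j]] else L) acc
      = acc ++ (l.filter (fun j => decide (j ≠ i))).map (fun j => PySem.Set.ofList [i, j]) := by
  induction l generalizing acc with
  | nil => simp
  | cons j l ih =>
    simp only [List.foldl_cons]
    by_cases h : j = i
    · subst h
      have h1 : ¬ PySem.Set.len (PySem.Set.ofList [j, j]) = 2 := by
        rw [pvOfList_pair_self]; simp [PySem.Set.len]
      rw [if_neg h1, ih]
      simp
    · have hne : i ≠ j := fun hh => h hh.symm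
      have h2 : PySem.Set.len (PySem.Set.ofList [i, j]) = 2 := by
        rw [pvOfList_pair i j hne]; simp [PySem.Set.len]
      rw [if_pos h2, ih]
      simp [h]

theorem pvDfold_append (acc : List (List Int)) (l1 l2 : List (List Int)) :
    pvDfold acc (l1 ++ l2) = pvDfold (pvDfold acc l1) l2 := by
  simp [pvDfold]

theorem pvDfold_skip (acc : List (List Int)) (l : List (List Int))
    (h : ∀ k ∈ l, acc.any (fun m => PySem.Set.equal k m) = true) : pvDfold acc l = acc := by
  induction l with
  | nil => rfl
  | cons k l ih =>
    have hk := h k (by simp)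
    simp only [pvDfold, List.foldl_cons, hk, if_pos]
    exact ih (fun k' hk' => h k' (by simp [hk']))

theorem pvDfold_new (acc : List (List Int)) (l : List (List Int))
    (h1 : ∀ k ∈ l, ∀ x ∈ acc, PySem.Set.equal k x = false)
    (h2 : l.Pairwise (fun a b => PySem.Set.equal b a = false)) :
    pvDfold acc l = acc ++ l := by
  induction l generalizing acc with
  | nil => simp [pvDfold]
  | cons k l ih =>
    have hany : acc.any (fun m => PySem.Set.equal k m) = false := by
      rw [List.any_eq_false]
      exact fun x hx => by simp [h1 k (by simp) x hx]
    simp only [pvDfold, List.foldl_cons, hany, Bool.false_eq_true, if_false]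
    have step := ih (acc ++ [k])
      (fun k' hk' x hx => by
        rcases List.mem_append.mp hx with hx | hx
        · exact h1 k' (by simp [hk']) x hx
        · simp only [List.mem_singleton] at hx; subst hx
          exact (List.pairwise_cons.mp h2).1 k' hk')
      ((List.pairwise_cons.mp h2).2)
    simpa [pvDfold, List.append_assoc] using step

theorem pvMem_pairs (m n : Int) (x : List Int) :
    x ∈ pvPairs m n ↔ ∃ i j : Int, 0 ≤ i ∧ i < m ∧ i < j ∧ j < n ∧ x = [i, j] := by
  simp only [pvPairs, List.mem_flatMap, List.mem_map, PySem.List.mem_pyRange_one]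
  constructor
  · rintro ⟨i, ⟨hi0, him⟩, j, ⟨hij, hjn⟩, rfl⟩
    exact ⟨i, j, hi0, him, by omega, hjn, rfl⟩
  · rintro ⟨i, j, hi0, him, hij, hjn, rfl⟩
    exact ⟨i, ⟨hi0, him⟩, j, ⟨by omega, hjn⟩, rfl⟩

theorem pvPairs_succ (m n : Int) (hm : 0 ≤ m) :
    pvPairs (m + 1) n = pvPairs m n ++ (PySem.List.pyRange (m + 1) n 1).map (fun j => [m, j]) := by
  unfold pvPairs
  rw [PySem.List.pyRange_one_succ_right hm, List.flatMap_append]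
  simp

-- one row of A's filtered grid splits at the diagonal
theorem pvRowA_split (m n : Int) (hm : 0 ≤ m) (hmn : m < n) :
    ((PySem.List.pyRange 0 n 1).filter (fun j => decide (j ≠ m))).map
        (fun j => PySem.Set.ofList [m, j])
      = (PySem.List.pyRange 0 m 1).map (fun j => PySem.Set.ofList [m, j])
        ++ (PySem.List.pyRange (m + 1) n 1).map (fun j => PySem.Set.ofList [m, j]) := by
  rw [PySem.List.pyRange_one_append 0 m n hm (le_of_lt hmn),
    PySem.List.pyRange_one_cons hmn]
  rw [List.filter_append]
  have hleft : (PySem.List.pyRange 0 m 1).filter (fun j => decide (j ≠ m))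
      = PySem.List.pyRange 0 m 1 := by
    apply List.filter_eq_self.mpr
    intro j hj
    have := PySem.List.mem_pyRange_one.mp hj
    simp; omega
  have hright : (m :: PySem.List.pyRange (m + 1) n 1).filter (fun j => decide (j ≠ m))
      = PySem.List.pyRange (m + 1) n 1 := by
    rw [List.filter_cons]
    simp only [ne_eq, not_true_eq_false, decide_false]
    rw [if_neg (by simp)]
    apply List.filter_eq_self.mpr
    intro j hj
    have := PySem.List.mem_pyRange_one.mp hj
    simp; omega
  rw [hleft, hright, List.map_append]

-- main invariant: deduping the first m rows of A's grid yields the upper triangle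
theorem pvMain (n : Int) : ∀ m : Nat, (m : Int) ≤ n →
    pvDfold [] ((PySem.List.pyRange 0 (m : Int) 1).flatMap (fun i =>
      ((PySem.List.pyRange 0 n 1).filter (fun j => decide (j ≠ i))).map
        (fun j => PySem.Set.ofList [i, j])))
      = pvPairs (m : Int) n := by
  intro m
  induction m with
  | zero => intro _; simp [pvPairs, PySem.List.pyRange_zero, pvDfold]
  | succ m ih =>
    intro hle
    have hm : (0 : Int) ≤ (m : Int) := by positivity
    have hmn : (m : Int) < n := by push_cast at hle ⊢; omega
    have hcast : ((m + 1 : Nat) : Int) = (m : Int) + 1 := by push_cast; ring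
    rw [hcast, PySem.List.pyRange_one_succ_right hm, List.flatMap_append]
    rw [pvDfold_append, ih (by omega)]
    simp only [List.flatMap_cons, List.flatMap_nil, List.append_nil]
    rw [pvRowA_split (m : Int) n hm hmn, pvDfold_append]
    -- left half: every [m,j] with j < m duplicates [j,m] already in pvPairs m n
    have hskip : pvDfold (pvPairs (m : Int) n)
        ((PySem.List.pyRange 0 (m : Int) 1).map (fun j => PySem.Set.ofList [m, j]))
        = pvPairs (m : Int) n := by
      apply pvDfold_skip
      intro k hk
      rcases List.mem_map.mp hk with ⟨j, hj, rfl⟩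
      have hjr := PySem.List.mem_pyRange_one.mp hj
      have hne : (m : Int) ≠ j := by omega
      rw [pvOfList_pair _ _ hne]
      rw [List.any_eq_true]
      refine ⟨[j, (m : Int)], ?_, ?_⟩
      · exact (pvMem_pairs _ _ _).mpr ⟨j, (m : Int), by omega, by omega, by omega, by omega, rfl⟩
      · rw [pvEqual_pair_iff]; omega
    rw [hskip]
    -- right half: every [m,j] with j > m is new and appended in order
    have hmap : (PySem.List.pyRange ((m : Int) + 1) n 1).map (fun j => PySem.Set.ofList [(m : Int), j])
        = (PySem.List.pyRange ((m : Int) + 1) n 1).map (fun j => [(m : Int), j]) := by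
      apply List.map_congr_left
      intro j hj
      have hjr := PySem.List.mem_pyRange_one.mp hj
      exact pvOfList_pair _ _ (by omega)
    rw [hmap]
    have hnew : pvDfold (pvPairs (m : Int) n)
        ((PySem.List.pyRange ((m : Int) + 1) n 1).map (fun j => [(m : Int), j]))
        = pvPairs (m : Int) n
          ++ (PySem.List.pyRange ((m : Int) + 1) n 1).map (fun j => [(m : Int), j]) := by
      apply pvDfold_new
      · intro k hk x hx
        rcases List.mem_map.mp hk with ⟨j, hj, rfl⟩
        have hjr := PySem.List.mem_pyRange_one.mp hj
        rcases (pvMem_pairs _ _ _).mp hx with ⟨i', j', hi0, him, hij, hjn, rfl⟩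
        rw [← Bool.not_eq_true, pvEqual_pair_iff]
        omega
      · have hp : (PySem.List.pyRange ((m : Int) + 1) n 1).Pairwise
            (fun a b => a ∈ PySem.List.pyRange ((m : Int) + 1) n 1
              ∧ b ∈ PySem.List.pyRange ((m : Int) + 1) n 1 ∧ a < b) :=
          List.Pairwise.and_mem.mp (PySem.List.pairwise_lt_pyRange_one _ _)
        refine List.Pairwise.map _ (fun a b hab => ?_) hp
        obtain ⟨ha, hb, hlt⟩ := hab
        have har := PySem.List.mem_pyRange_one.mp ha
        have hbr := PySem.List.mem_pyRange_one.mp hb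
        rw [← Bool.not_eq_true, pvEqual_pair_iff]
        omega
    rw [hnew, pvPairs_succ _ _ hm]

theorem pvAlt_eq_pairs (n : Int) : choose_two_alt n = pvPairs n n := by
  unfold choose_two_alt pvPairs
  rw [List.flatMap_def, List.flatMap_def]
  congr 1
  apply List.map_congr_left
  intro i hi
  have hir := PySem.List.mem_pyRange_one.mp hi
  apply List.map_congr_left
  intro j hj
  have hjr := PySem.List.mem_pyRange_one.mp hj
  exact pvOfList_pair _ _ (by omega)

-- ===== VERDICT (by name: the statement is the Claim_ definition above) =====
theorem choose_two_spec : Claim_equal_choose_two := by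
  intro n _
  unfold Spec_choose_two choose_two
  dsimp only
  rw [pvAlt_eq_pairs]
  have hfun : (fun (L : List (PySem.Set Int)) (i : Int) =>
      List.foldl (fun L j => if PySem.Set.len (PySem.Set.ofList [i, j]) = 2 then
        L ++ [PySem.Set.ofList [i, j]] else L) L (PySem.List.pyRange 0 n 1))
      = fun L i => L ++ ((PySem.List.pyRange 0 n 1).filter (fun j => decide (j ≠ i))).map
          (fun j => PySem.Set.ofList [i, j]) := by
    funext L i; exact pvInner_fold i _ L
  rw [hfun, PySem.List.foldl_append_eq_flatMap, List.nil_append]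
  by_cases hn : 0 ≤ n
  · have h := pvMain n n.toNat (by omega)
    rw [Int.toNat_of_nonneg hn] at h
    exact h
  · rw [PySem.List.pyRange_one_eq_nil (by omega)]
    simp [pvPairs, PySem.List.pyRange_one_eq_nil (show n ≤ 0 by omega)]
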